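-- pv_equiv track=rewrite | github.com/RTXteam/RTX-KG2 | canonicalized/create_canonicalized_kg_tsvs.py | _modify_column_headers_for_neo4j
-- ===== SOURCE A (Python) =====
-- from typing import List, Dict, Tuple, Union
--
-- def _modify_column_headers_for_neo4j(plain_column_headers: List[str]) -> List[str]:
--     modified_headers = []
--     array_columns = ['provided_by', 'types', 'equivalent_curies', 'publications']
--     for header in plain_column_headers:
--         if header in array_columns:
--             header = f"{header}:string[]"
--         elif header == 'id':
--             header = f"{header}:ID"
--         elif header == 'preferred_type_for_conversion':
--             header = ":LABEL"
--         elif header == 'subject_for_conversion':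
--             header = ":START_ID"
--         elif header == 'object_for_conversion':
--             header = ":END_ID"
--         elif header == 'simplified_edge_label_for_conversion':
--             header = ":TYPE"
--         modified_headers.append(header)
--     return modified_headers
-- ===== SOURCE B (Python) =====
-- from typing import List, Dict, Tuple, Union
--
-- # Rule-major rewrite: instead of walking the headers once with a branch cascade,
-- # take a copy of the list and apply each rename rule as its own pass that patches
-- # the matching positions in place. Rule names are distinct, so at most one rule
-- # touches any position and unmatched headers pass through unchanged.
-- _NEO4J_RENAME_RULES = [
--     ('provided_by', 'provided_by:string[]'),
--     ('types', 'types:string[]'),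
--     ('equivalent_curies', 'equivalent_curies:string[]'),
--     ('publications', 'publications:string[]'),
--     ('id', 'id:ID'),
--     ('preferred_type_for_conversion', ':LABEL'),
--     ('subject_for_conversion', ':START_ID'),
--     ('object_for_conversion', ':END_ID'),
--     ('simplified_edge_label_for_conversion', ':TYPE'),
-- ]
--
-- def _modify_column_headers_for_neo4j(plain_column_headers: List[str]) -> List[str]:
--     modified = list(plain_column_headers)
--     for name, replacement in _NEO4J_RENAME_RULES:
--         for i, header in enumerate(plain_column_headers):
--             if header == name:
--                 modified[i] = replacement
--     return modified
-- ===== Notes on version B (the rewrite author's own statement) =====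
-- stated objective: alternative
-- what changed: Loop interchange: A walks the headers once, deciding each one with an if/elif cascade and appending; B copies the list and runs one pass per rename rule (rule-major), patching matching positions of the copy in place, correct because rule names are pairwise distinct.
import Mathlib
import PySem

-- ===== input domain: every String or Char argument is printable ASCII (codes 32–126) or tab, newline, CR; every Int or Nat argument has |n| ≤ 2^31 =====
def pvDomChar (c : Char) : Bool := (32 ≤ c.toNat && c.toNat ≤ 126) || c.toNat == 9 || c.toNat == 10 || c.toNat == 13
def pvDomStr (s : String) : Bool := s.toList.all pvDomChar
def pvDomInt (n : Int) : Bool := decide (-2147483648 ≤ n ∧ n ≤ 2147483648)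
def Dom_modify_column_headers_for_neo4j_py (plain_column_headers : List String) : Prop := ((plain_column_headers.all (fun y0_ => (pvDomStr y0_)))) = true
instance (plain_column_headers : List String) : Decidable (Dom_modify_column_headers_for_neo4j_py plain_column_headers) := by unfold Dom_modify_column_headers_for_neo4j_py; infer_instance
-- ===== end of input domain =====

-- B replaces A's single header-major pass with a branch cascade by rule-major passes that patch a copy of the list in place (alternative decomposition).


-- ===== PORT A =====
-- transliteration of A: builds modified_headers by appending, with the original if/elif chain
def pvConvA (header : String) : String :=
  let array_columns : List String := ["provided_by", "types", "equivalent_curies", "publications"]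
  if header ∈ array_columns then header ++ ":string[]"
  else if header = "id" then header ++ ":ID"
  else if header = "preferred_type_for_conversion" then ":LABEL"
  else if header = "subject_for_conversion" then ":START_ID"
  else if header = "object_for_conversion" then ":END_ID"
  else if header = "simplified_edge_label_for_conversion" then ":TYPE"
  else header

def modify_column_headers_for_neo4j_py (plain_column_headers : List String) : List String :=
  plain_column_headers.foldl (fun modified_headers header => modified_headers ++ [pvConvA header]) []

-- ===== PORT B =====
-- B: rule-major staged passes; each rule patches the positions of the copy where the
-- ORIGINAL header equals the rule name ('for i, header in enumerate(plain_column_headers):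
-- if header == name: modified[i] = replacement' — rendered as a zipWith over originals and copy,
-- exact since both lists have equal length).
def pvNeo4jRenameRules : List (String × String) :=
  [("provided_by", "provided_by:string[]"),
   ("types", "types:string[]"),
   ("equivalent_curies", "equivalent_curies:string[]"),
   ("publications", "publications:string[]"),
   ("id", "id:ID"),
   ("preferred_type_for_conversion", ":LABEL"),
   ("subject_for_conversion", ":START_ID"),
   ("object_for_conversion", ":END_ID"),
   ("simplified_edge_label_for_conversion", ":TYPE")]

def pvApplyRule (headers : List String) (modified : List String) (rule : String × String) : List String :=
  List.zipWith (fun header m => if header = rule.1 then rule.2 else m) headers modified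

def modify_column_headers_for_neo4j_py_alt (plain_column_headers : List String) : List String :=
  pvNeo4jRenameRules.foldl (pvApplyRule plain_column_headers) plain_column_headers

-- ===== PRECONDITION & SPEC =====
def Spec_modify_column_headers_for_neo4j_py (plain_column_headers : List String) (out : List String) : Prop := out = modify_column_headers_for_neo4j_py_alt plain_column_headers
instance (plain_column_headers : List String) (out : List String) : Decidable (Spec_modify_column_headers_for_neo4j_py plain_column_headers out) := by unfold Spec_modify_column_headers_for_neo4j_py; infer_instance

-- ===== CLAIM =====
def Claim_equal_modify_column_headers_for_neo4j_py : Prop := ∀ (plain_column_headers : List String), Dom_modify_column_headers_for_neo4j_py plain_column_headers → Spec_modify_column_headers_for_neo4j_py plain_column_headers (modify_column_headers_for_neo4j_py plain_column_headers)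

-- ===== LEMMAS AND PROOFS =====

-- the per-position effect of folding all the rules over a cons decomposes pointwise
lemma foldl_applyRule_cons (rules : List (String × String)) (x : String) (hs : List String)
    (a : String) (as : List String) :
    rules.foldl (pvApplyRule (x :: hs)) (a :: as)
      = rules.foldl (fun acc r => if x = r.1 then r.2 else acc) a
        :: rules.foldl (pvApplyRule hs) as := by
  induction rules generalizing a as with
  | nil => rfl
  | cons r rs ih => simp [pvApplyRule, ih]

-- folding the concrete rule list on one header equals A's branch cascade
lemma foldl_rules_eq_convA (x : String) :
    pvNeo4jRenameRules.foldl (fun acc r => if x = r.1 then r.2 else acc) x = pvConvA x := by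
  by_cases h1 : x = "provided_by"; · subst h1; decide
  by_cases h2 : x = "types"; · subst h2; decide
  by_cases h3 : x = "equivalent_curies"; · subst h3; decide
  by_cases h4 : x = "publications"; · subst h4; decide
  by_cases h5 : x = "id"; · subst h5; decide
  by_cases h6 : x = "preferred_type_for_conversion"; · subst h6; decide
  by_cases h7 : x = "subject_for_conversion"; · subst h7; decide
  by_cases h8 : x = "object_for_conversion"; · subst h8; decide
  by_cases h9 : x = "simplified_edge_label_for_conversion"; · subst h9; decide
  simp [pvNeo4jRenameRules, pvConvA, h1, h2, h3, h4, h5, h6, h7, h8, h9]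

lemma alt_eq_map (hs : List String) :
    modify_column_headers_for_neo4j_py_alt hs = hs.map pvConvA := by
  unfold modify_column_headers_for_neo4j_py_alt
  induction hs with
  | nil => simp [pvNeo4jRenameRules, pvApplyRule]
  | cons x t ih => rw [foldl_applyRule_cons, ih, foldl_rules_eq_convA]; rfl

-- ===== VERDICT =====
theorem modify_column_headers_for_neo4j_py_spec : Claim_equal_modify_column_headers_for_neo4j_py := by
  intro xs _
  unfold Spec_modify_column_headers_for_neo4j_py
  rw [modify_column_headers_for_neo4j_py, PySem.List.foldl_append_singleton_eq_map, alt_eq_map]; rfl
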